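-- pv_equiv track=rewrite | github.com/barad1tos/Python-Scripts | music_genre_updater.py | group_tracks_by_artist
-- ===== SOURCE A (Python) =====
-- def group_tracks_by_artist(tracks):
--     """Групує треки за виконавцем."""
--     artists = {}
--     for track in tracks:
--         artist = track["artist"]
--         if artist not in artists:
--             artists[artist] = []
--         artists[artist].append(track)
--     return artists
-- ===== SOURCE B (Python) =====
-- def group_tracks_by_artist(tracks):
--     """Групує треки за виконавцем."""
--     order = list(dict.fromkeys(t["artist"] for t in tracks))
--     return {a: [t for t in tracks if t["artist"] == a] for a in order}
-- ===== Notes on version B (the rewrite author's own statement) =====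
-- stated objective: alternative
-- what changed: B replaces A's single-pass dict accumulation (create-empty-then-append per track) by first computing the distinct artists in first-occurrence order with dict.fromkeys and then building each group with one filter comprehension per artist.
import Mathlib
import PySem

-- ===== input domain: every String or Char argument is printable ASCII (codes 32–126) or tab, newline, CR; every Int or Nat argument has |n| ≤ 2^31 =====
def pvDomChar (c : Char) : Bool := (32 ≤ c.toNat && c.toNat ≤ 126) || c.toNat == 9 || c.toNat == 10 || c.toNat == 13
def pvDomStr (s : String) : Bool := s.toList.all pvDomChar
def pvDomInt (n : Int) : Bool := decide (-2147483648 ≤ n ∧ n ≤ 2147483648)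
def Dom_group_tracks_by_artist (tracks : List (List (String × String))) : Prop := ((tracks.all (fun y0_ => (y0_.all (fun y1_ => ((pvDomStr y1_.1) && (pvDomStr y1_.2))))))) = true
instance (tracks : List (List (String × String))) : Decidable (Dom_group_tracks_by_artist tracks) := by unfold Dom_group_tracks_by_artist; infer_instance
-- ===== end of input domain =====

-- B replaces A's single-pass dict accumulation by ordered dedup of artist keys + one filter per artist (alternative decomposition, not faster).


-- track["artist"]: first-match lookup in the association list (total form; Pre_ guarantees the key is present)
def trackArtist (t : List (String × String)) : String :=
  PySem.Dict.getD (PySem.Dict.mk t) "artist" ""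

-- ===== PORT A =====
-- 'if artist not in artists: artists[artist] = []; artists[artist].append(track)' is exactly d[k] = f(d.get(k, [])), i.e. Dict.modify
def group_tracks_by_artist (tracks : List (List (String × String))) : List (String × List (List (String × String))) :=
  (tracks.foldl
    (fun artists track => artists.modify (trackArtist track) [] (· ++ [track]))
    PySem.Dict.empty).items

-- ===== PORT B =====
def group_tracks_by_artist_alt (tracks : List (List (String × String))) : List (String × List (List (String × String))) :=
  let order := PySem.List.dedup (tracks.map trackArtist)
  order.map (fun a => (a, tracks.filter (fun t => trackArtist t == a)))

-- ===== PRECONDITION & SPEC =====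
-- Pre_ excludes tracks missing an "artist" key, on which Python A raises KeyError.
def Pre_group_tracks_by_artist (tracks : List (List (String × String))) : Prop :=
  ∀ t ∈ tracks, "artist" ∈ t.map Prod.fst
instance (tracks : List (List (String × String))) : Decidable (Pre_group_tracks_by_artist tracks) := by unfold Pre_group_tracks_by_artist; infer_instance
def pvWitness_group_tracks_by_artist : (List (List (String × String))) :=
  [[("artist", "a"), ("name", "x")], [("artist", "b")], [("artist", "a"), ("name", "y")]]

def Spec_group_tracks_by_artist (tracks : List (List (String × String))) (out : List (String × List (List (String × String)))) : Prop := out = group_tracks_by_artist_alt tracks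
instance (tracks : List (List (String × String))) (out : List (String × List (List (String × String)))) : Decidable (Spec_group_tracks_by_artist tracks out) := by unfold Spec_group_tracks_by_artist; infer_instance

-- ===== CLAIM (what is proved, stated in full; the proofs are below) =====
def Claim_equal_group_tracks_by_artist : Prop := ∀ (tracks : List (List (String × String))), Dom_group_tracks_by_artist tracks → Pre_group_tracks_by_artist tracks → Spec_group_tracks_by_artist tracks (group_tracks_by_artist tracks)

-- ===== LEMMAS AND PROOFS =====

theorem groupDict_keys (tracks : List (List (String × String))) :
    ((tracks.foldl (fun artists track => artists.modify (trackArtist track) [] (· ++ [track])) PySem.Dict.empty)).keys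
      = PySem.List.dedup (tracks.map trackArtist) := by
  rw [PySem.Dict.keys_foldl_modify_key tracks trackArtist]
  simp [PySem.Set.update_nil_left]

theorem groupDict_nodup (tracks : List (List (String × String))) :
    ((tracks.foldl (fun artists track => artists.modify (trackArtist track) [] (· ++ [track])) PySem.Dict.empty)).keys.Nodup := by
  rw [groupDict_keys]
  exact PySem.List.nodup_dedup _

theorem groupDict_getD (tracks : List (List (String × String))) (c : String) :
    ((tracks.foldl (fun artists track => artists.modify (trackArtist track) [] (· ++ [track])) PySem.Dict.empty)).getD c []
      = tracks.filter (fun t => trackArtist t == c) := by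
  have h : tracks.foldl (fun artists track => artists.modify (trackArtist track) [] (· ++ [track])) PySem.Dict.empty
      = (tracks.map (fun t => (trackArtist t, t))).foldl (fun d p => d.modify p.1 [] (· ++ [p.2])) PySem.Dict.empty := by
    rw [List.foldl_map]
  rw [h, PySem.Dict.getD_foldl_modify_append]
  simp [List.filter_map, Function.comp_def]

-- ===== VERDICT (by name: the statement is the Claim_ definition above) =====
theorem group_tracks_by_artist_spec : Claim_equal_group_tracks_by_artist := by
  intro tracks _ _
  unfold Spec_group_tracks_by_artist group_tracks_by_artist group_tracks_by_artist_alt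
  rw [PySem.Dict.items_eq_map_keys _ (groupDict_nodup tracks) ([] : List (List (String × String))),
    groupDict_keys]
  exact List.map_congr_left (fun a _ => by rw [groupDict_getD])
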